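-- pv_equiv track=rewrite | github.com/solonsrs94-blip/financial-workbench | pages/valuation/dcf_step1_historical.py | _get_flag_severity_by_year
-- ===== SOURCE A (Python) =====
-- def _get_flag_severity_by_year(flags: list[dict]) -> dict:
--     """Build {year: max_severity} from flags."""
--     sev_map = {}
--     for f in flags:
--         yr = f.get("year", "")
--         sev = f.get("severity", "low")
--         if yr not in sev_map or sev == "high":
--             sev_map[yr] = sev
--         elif sev == "medium" and sev_map.get(yr) != "high":
--             sev_map[yr] = "medium"
--     return sev_map
-- ===== SOURCE B (Python) =====
-- def _get_flag_severity_by_year(flags: list[dict]) -> dict: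
--     """Build {year: max_severity} from flags."""
--     groups = {}
--     for f in flags:
--         yr = f.get("year", "")
--         groups[yr] = groups.get(yr, []) + [f.get("severity", "low")]
--     rank = {"high": 2, "medium": 1}
--     return {yr: max(sevs, key=lambda s: rank.get(s, 0)) for yr, sevs in groups.items()}
-- ===== Notes on version B (the rewrite author's own statement) =====
-- stated objective: idiomatic
-- what changed: Replaces the interleaved conditional-update loop over one severity map by a group-then-reduce decomposition: one pass groups severities by year, then each group is reduced with max under a rank key, relying on max's first-maximal tie-break to keep the first-seen severity on rank ties.
import Mathlib
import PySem

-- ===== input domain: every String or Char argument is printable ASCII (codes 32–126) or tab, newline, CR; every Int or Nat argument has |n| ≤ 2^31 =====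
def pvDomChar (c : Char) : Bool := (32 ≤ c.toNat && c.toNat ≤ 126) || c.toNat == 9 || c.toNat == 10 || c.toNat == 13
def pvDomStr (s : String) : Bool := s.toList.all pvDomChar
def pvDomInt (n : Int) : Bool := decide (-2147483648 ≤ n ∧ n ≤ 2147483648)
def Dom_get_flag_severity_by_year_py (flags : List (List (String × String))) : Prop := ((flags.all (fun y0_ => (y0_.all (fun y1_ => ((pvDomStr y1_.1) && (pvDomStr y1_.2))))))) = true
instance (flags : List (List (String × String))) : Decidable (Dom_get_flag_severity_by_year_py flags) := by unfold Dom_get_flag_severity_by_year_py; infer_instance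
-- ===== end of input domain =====

-- B replaces A's interleaved conditional-update loop by a group-by-year pass followed by a
-- max-under-rank reduction of each group (objective: more idiomatic decomposition, same cost).

-- ===== PORT A =====
-- A mutates no argument; each flag dict f is an assoc list, f.get = first match.
def get_flag_severity_by_year_py (flags : List (List (String × String))) : List (String × String) :=
  (flags.foldl (fun sev_map f =>
      let yr := (PySem.Dict.mk f).getD "year" ""
      let sev := (PySem.Dict.mk f).getD "severity" "low"
      if !sev_map.contains yr || sev == "high" then sev_map.insert yr sev
      else if sev == "medium" && !(sev_map.get? yr == some "high") then sev_map.insert yr "medium"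
      else sev_map)
    PySem.Dict.empty).items

-- ===== PORT B =====
-- rank.get(s, 0)
def pvRank (s : String) : Int := (PySem.Dict.mk [("high", 2), ("medium", 1)]).getD s 0

def get_flag_severity_by_year_py_alt (flags : List (List (String × String))) : List (String × String) :=
  let groups : PySem.Dict String (List String) :=
    flags.foldl (fun g f =>
      g.modify ((PySem.Dict.mk f).getD "year" "") [] (· ++ [(PySem.Dict.mk f).getD "severity" "low"]))
      PySem.Dict.empty
  (groups.items.foldl (fun d p => d.insert p.1 ((PySem.List.max? p.2 pvRank).getD ""))
    PySem.Dict.empty).items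

-- ===== PRECONDITION & SPEC =====
def Spec_get_flag_severity_by_year_py (flags : List (List (String × String))) (out : List (String × String)) : Prop := out = get_flag_severity_by_year_py_alt flags
instance (flags : List (List (String × String))) (out : List (String × String)) : Decidable (Spec_get_flag_severity_by_year_py flags out) := by unfold Spec_get_flag_severity_by_year_py; infer_instance

-- ===== CLAIM (what is proved, stated in full; the proofs are below) =====
def Claim_equal_get_flag_severity_by_year_py : Prop := ∀ (flags : List (List (String × String))), Dom_get_flag_severity_by_year_py flags → Spec_get_flag_severity_by_year_py flags (get_flag_severity_by_year_py flags)

-- ===== LEMMAS AND PROOFS =====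

-- (year, severity) extracted from one flag dict
def pvFP (f : List (String × String)) : String × String :=
  ((PySem.Dict.mk f).getD "year" "", (PySem.Dict.mk f).getD "severity" "low")

-- A's loop body, on the extracted pair
def pvAStep (d : PySem.Dict String String) (p : String × String) : PySem.Dict String String :=
  if !d.contains p.1 || p.2 == "high" then d.insert p.1 p.2
  else if p.2 == "medium" && !(d.get? p.1 == some "high") then d.insert p.1 "medium"
  else d

-- the fold function inside PySem.List.max? at key pvRank
def pvComb (acc : Option String) (s : String) : Option String :=
  match acc with
  | none => some s
  | some m => if pvRank m < pvRank s then some s else some m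

lemma pvRank_eq (s : String) : pvRank s = if s = "high" then 2 else if s = "medium" then 1 else 0 := by
  have hnil : (PySem.Dict.mk ([] : List (String × Int))).get? s = none := rfl
  rw [pvRank, PySem.Dict.getD_eq_get?_getD, PySem.Dict.get?_mk_cons, PySem.Dict.get?_mk_cons]
  by_cases h1 : s = "high"
  · simp [h1]
  · have b1 : ("high" == s) = false := beq_eq_false_iff_ne.mpr (fun h => h1 h.symm)
    by_cases h2 : s = "medium"
    · simp [b1, h1, h2]
    · have b2 : ("medium" == s) = false := beq_eq_false_iff_ne.mpr (fun h => h2 h.symm)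
      simp [b1, b2, h1, h2, hnil]

lemma pvComb_some (m s : String) :
    pvComb (some m) s = if pvRank m < pvRank s then some s else some m := rfl

lemma max?_eq_foldl_comb (l : List String) : PySem.List.max? l pvRank = l.foldl pvComb none := by
  unfold PySem.List.max?
  exact List.foldl_ext _ _ none (fun a b _ => by cases a <;> rfl)

lemma portA_eq (flags : List (List (String × String))) :
    get_flag_severity_by_year_py flags = ((flags.map pvFP).foldl pvAStep PySem.Dict.empty).items := by
  rw [List.foldl_map]; rfl

lemma pvAStep_get? (d : PySem.Dict String String) (p : String × String) (k : String) :
    (pvAStep d p).get? k = if p.1 = k then pvComb (d.get? p.1) p.2 else d.get? k := by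
  by_cases hk : p.1 = k
  · rw [if_pos hk]; subst hk
    rcases hget : d.get? p.1 with _ | m
    · have hc : d.contains p.1 = false := by
        rw [PySem.Dict.contains_eq_isSome_get?, hget]; rfl
      simp [pvAStep, hc, PySem.Dict.get?_insert_self, pvComb]
    · have hc : d.contains p.1 = true := by
        rw [PySem.Dict.contains_eq_isSome_get?, hget]; rfl
      by_cases h2 : p.2 = "high"
      · have r2 : pvRank p.2 = 2 := by rw [pvRank_eq, if_pos h2]
        have hr : pvComb (some m) p.2 = some p.2 := by
          by_cases hm : m = "high"
          · have rm : pvRank m = 2 := by rw [pvRank_eq, if_pos hm]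
            rw [pvComb_some, r2, rm, if_neg (by omega), hm, h2]
          · have rm : pvRank m ≤ 1 := by
              rw [pvRank_eq, if_neg hm]; split_ifs <;> omega
            rw [pvComb_some, r2, if_pos (by omega)]
        rw [h2] at hr
        simp [pvAStep, hc, h2, PySem.Dict.get?_insert_self, hr]
      · by_cases h3 : p.2 = "medium"
        · have r1 : pvRank p.2 = 1 := by rw [pvRank_eq, if_neg h2, if_pos h3]
          by_cases hm : m = "high"
          · have rm : pvRank m = 2 := by rw [pvRank_eq, if_pos hm]
            have hr : pvComb (some m) p.2 = some m := by
              rw [pvComb_some, r1, rm, if_neg (by omega)]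
            rw [h3, hm] at hr
            simp [pvAStep, hc, h2, h3, hget, hm, hr]
          · have rm : pvRank m = if m = "medium" then 1 else 0 := by
              rw [pvRank_eq, if_neg hm]
            have hr : pvComb (some m) p.2 = some "medium" := by
              rw [pvComb_some, r1, rm]
              by_cases hm2 : m = "medium"
              · simp [hm2]
              · simp [hm2, h3]
            rw [h3] at hr
            simp [pvAStep, hc, h2, h3, hget, hm, PySem.Dict.get?_insert_self, hr]
        · have r0 : pvRank p.2 = 0 := by rw [pvRank_eq, if_neg h2, if_neg h3]
          have hlt : ¬ pvRank m < pvRank p.2 := by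
            rw [r0, pvRank_eq]; split_ifs <;> omega
          have hr : pvComb (some m) p.2 = some m := by
            rw [pvComb_some, if_neg hlt]
          simp [pvAStep, hc, h2, h3, hget, hr]
  · have step : ∀ v, (d.insert p.1 v).get? k = d.get? k := fun v =>
      PySem.Dict.get?_insert_of_ne d v (fun h => hk h.symm)
    rw [if_neg hk]; unfold pvAStep
    split_ifs <;> simp [step]

lemma pvA_fold_get? (l : List (String × String)) (d : PySem.Dict String String) (k : String) :
    (l.foldl pvAStep d).get? k
      = ((l.filter (fun p => p.1 == k)).map (·.2)).foldl pvComb (d.get? k) := by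
  induction l generalizing d with
  | nil => rfl
  | cons p t ih =>
    simp only [List.foldl_cons, List.filter_cons]
    by_cases h : p.1 = k
    · simp only [h, beq_self_eq_true, if_pos, List.map_cons, List.foldl_cons, ih,
        pvAStep_get?, if_pos h, h]
    · have hb : (p.1 == k) = false := beq_eq_false_iff_ne.mpr h
      simp only [hb, Bool.false_eq_true, if_neg, ih, pvAStep_get?, if_neg h]
      rfl

lemma pvAStep_keys (d : PySem.Dict String String) (p : String × String) :
    (pvAStep d p).keys = PySem.Set.add d.keys p.1 := by
  by_cases hc : d.contains p.1 = true
  · have hmem : p.1 ∈ d.keys := (PySem.Dict.contains_iff_mem_keys d p.1).mp hc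
    have hadd : PySem.Set.add d.keys p.1 = d.keys := by
      simp [PySem.Set.add, hmem]
    unfold pvAStep
    split_ifs
    · rw [PySem.Dict.keys_insert_of_contains d p.2 hc, hadd]
    · rw [PySem.Dict.keys_insert_of_contains d "medium" hc, hadd]
    · rw [hadd]
  · have hc' : d.contains p.1 = false := by simpa using hc
    have hmem : p.1 ∉ d.keys := fun h => hc ((PySem.Dict.contains_iff_mem_keys d p.1).mpr h)
    have hadd : PySem.Set.add d.keys p.1 = d.keys ++ [p.1] := by
      simp [PySem.Set.add, hmem]
    have hcond : (!d.contains p.1 || p.2 == "high") = true := by rw [hc']; rfl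
    unfold pvAStep
    rw [if_pos hcond, PySem.Dict.keys_insert_of_not_contains d p.2 hc', hadd]

lemma pvA_fold_keys (l : List (String × String)) (d : PySem.Dict String String) :
    (l.foldl pvAStep d).keys = PySem.Set.update d.keys (l.map (·.1)) := by
  induction l generalizing d with
  | nil => rfl
  | cons p t ih =>
    simp only [List.foldl_cons, List.map_cons, PySem.Set.update_cons, ih, pvAStep_keys]

-- ===== VERDICT (by name: the statement is the Claim_ definition above) =====
theorem get_flag_severity_by_year_py_spec : Claim_equal_get_flag_severity_by_year_py := by
  intro flags _
  unfold Spec_get_flag_severity_by_year_py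
  rw [portA_eq]
  unfold get_flag_severity_by_year_py_alt
  set ps := flags.map pvFP with hps
  -- B's grouping fold, over the extracted pairs
  have hgroups :
      (flags.foldl (fun g f =>
        g.modify ((PySem.Dict.mk f).getD "year" "") [] (· ++ [(PySem.Dict.mk f).getD "severity" "low"]))
        (PySem.Dict.empty : PySem.Dict String (List String)))
      = ps.foldl (fun g p => g.modify p.1 [] (· ++ [p.2])) PySem.Dict.empty := by
    rw [hps, List.foldl_map]; rfl
  rw [hgroups]
  set groups := ps.foldl (fun g p => g.modify p.1 [] (· ++ [p.2]))
      (PySem.Dict.empty : PySem.Dict String (List String)) with hg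
  set dA := ps.foldl pvAStep (PySem.Dict.empty : PySem.Dict String String) with hdA
  have hkeysG : groups.keys = PySem.Set.update PySem.Dict.empty.keys (ps.map (·.1)) :=
    PySem.Dict.keys_foldl_modify_key ps (·.1) [] (fun _ p => (· ++ [p.2])) PySem.Dict.empty
  have hndG : groups.keys.Nodup :=
    PySem.Dict.nodup_keys_foldl_modify_key ps (·.1) [] (fun _ p => (· ++ [p.2]))
      PySem.Dict.empty PySem.Dict.nodup_keys_empty
  have hkeysA : dA.keys = PySem.Set.update PySem.Dict.empty.keys (ps.map (·.1)) :=
    pvA_fold_keys ps PySem.Dict.empty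
  have hndA : dA.keys.Nodup := by
    rw [hkeysA]; exact PySem.Set.nodup_update _ _ (by simp [PySem.Dict.keys_empty])
  have hitemsA := PySem.Dict.items_eq_map_keys dA hndA ""
  have hitemsG := PySem.Dict.items_eq_map_keys groups hndG []
  -- B's output fold over groups.items : fresh distinct keys append
  have hfreshnd : (groups.items.map (·.1)).Nodup := hndG
  have hB : (groups.items.foldl (fun d p => d.insert p.1 ((PySem.List.max? p.2 pvRank).getD ""))
        (PySem.Dict.empty : PySem.Dict String String)).items
      = groups.items.map (fun p => (p.1, (PySem.List.max? p.2 pvRank).getD "")) := by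
    rw [PySem.Dict.items_foldl_insert_fresh groups.items (·.1)
      (fun p => (PySem.List.max? p.2 pvRank).getD "") PySem.Dict.empty
      (fun a _ => PySem.Dict.contains_empty _) hfreshnd]
    rfl
  have hk : dA.keys = groups.keys := hkeysA.trans hkeysG.symm
  rw [hB, hitemsA, hitemsG, List.map_map, hk]
  apply List.map_congr_left
  intro k _
  have hGetD : groups.getD k [] = (ps.filter (fun p => p.1 == k)).map (·.2) := by
    rw [hg, PySem.Dict.getD_foldl_modify_append]
    simp [PySem.Dict.getD_empty]
  have hA : dA.getD k "" = (((ps.filter (fun p => p.1 == k)).map (·.2)).foldl pvComb none).getD "" := by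
    rw [PySem.Dict.getD_eq_get?_getD, hdA, pvA_fold_get?, PySem.Dict.get?_empty]
  simp only [Function.comp]
  rw [hA, hGetD, max?_eq_foldl_comb]
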